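-- pv_equiv track=rewrite | github.com/CHG1007/Algorithm | 백준/Silver/27971. 강아지는 많을수록 좋다/강아지는 많을수록 좋다.py | bfs
-- ===== SOURCE A (Python) =====
-- from collections import deque
--
-- def bfs(n, a, b, forbidden_ranges):
--     queue = deque()
--     visited = [0] * (n + 1)
--
--     queue.append(0)
--     visited[0] = 1
--
--     while queue:
--         cur = queue.popleft()
--
--         # 목표 수에 도달했을 경우
--         if cur == n:
--             return visited[cur] - 1
--
--         for d in (a, b):
--             next_cnt = cur + d
--             if 0 <= next_cnt <= n and visited[next_cnt] == 0:
--                 # 금지 구간에 포함되면 스킵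
--                 for start, end in forbidden_ranges:
--                     if start <= next_cnt <= end:
--                         break
--                 else:
--                     queue.append(next_cnt)
--                     visited[next_cnt] = visited[cur] + 1
--
--     # 도달 불가능
--     return -1
-- ===== SOURCE B (Python) =====
-- def bfs(n, a, b, forbidden_ranges):
--     # Precompute a boolean forbidden table via a difference array (O(n+R)),
--     # then BFS over a growing list with a head index instead of a deque,
--     # so each move is an O(1) table lookup instead of rescanning the ranges.
--     diff = [0] * (n + 2)
--     for s, e in forbidden_ranges:
--         lo = max(s, 0)
--         hi = min(e, n)
--         if lo <= hi:
--             diff[lo] += 1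
--             diff[hi + 1] -= 1
--     forb = []
--     run = 0
--     for v in diff:
--         run += v
--         forb.append(run > 0)
--
--     dist = [-1] * (n + 1)
--     dist[0] = 0
--     order = [0]
--     i = 0
--     while i < len(order):
--         cur = order[i]
--         i += 1
--         if cur == n:
--             return dist[cur]
--         for nxt in (cur + a, cur + b):
--             if 0 <= nxt <= n and dist[nxt] < 0 and not forb[nxt]:
--                 dist[nxt] = dist[cur] + 1
--                 order.append(nxt)
--     return -1
-- ===== Notes on version B (the rewrite author's own statement) =====
-- stated objective: alternative
-- what changed: B precomputes a boolean forbidden table with a difference array + prefix sums and runs the BFS over a growing list with a head index (no deque), so every move is one O(1) table lookup instead of A's rescan of forbidden_ranges at each step.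
import Mathlib
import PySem

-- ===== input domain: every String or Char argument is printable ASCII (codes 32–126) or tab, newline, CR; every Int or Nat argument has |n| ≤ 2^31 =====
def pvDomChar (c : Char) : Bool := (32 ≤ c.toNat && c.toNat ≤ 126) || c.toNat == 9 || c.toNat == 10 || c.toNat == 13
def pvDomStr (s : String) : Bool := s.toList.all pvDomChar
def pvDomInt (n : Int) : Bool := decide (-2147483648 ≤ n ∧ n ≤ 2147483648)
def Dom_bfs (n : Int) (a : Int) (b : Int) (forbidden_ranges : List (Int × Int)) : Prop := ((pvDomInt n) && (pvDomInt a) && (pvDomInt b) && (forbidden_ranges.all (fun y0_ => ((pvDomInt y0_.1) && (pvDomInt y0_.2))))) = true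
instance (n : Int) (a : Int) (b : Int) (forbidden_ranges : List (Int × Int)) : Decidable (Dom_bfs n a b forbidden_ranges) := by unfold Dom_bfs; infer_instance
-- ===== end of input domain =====

-- B replaces A's per-move scan of forbidden_ranges by a difference-array/prefix-sum
-- boolean table consulted in O(1), and replaces the deque by a growing list walked
-- with a head index; same return value on every n ≥ 0.

-- ===== PORT A =====
-- deque.popleft on a two-list queue (front, back); none = queue empty
def bfsPop (q : List Int × List Int) : Option (Int × (List Int × List Int)) :=
  match q.1 with
  | cur :: front => some (cur, (front, q.2))
  | [] =>
    match q.2.reverse with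
    | cur :: front => some (cur, (front, []))
    | [] => none

-- one attempted move of A's inner `for d in (a, b)` body (indices are checked
-- 0 ≤ nxt ≤ n before any access, so getD/setIfInBounds with .toNat are exact here)
def bfsStepA (n : Int) (rs : List (Int × Int)) (queue : List Int × List Int)
    (visited : Array Int) (cur nxt : Int) : (List Int × List Int) × Array Int :=
  if 0 ≤ nxt ∧ nxt ≤ n ∧ visited.getD nxt.toNat 0 = 0 then
    -- A's for-else over forbidden_ranges (break on first covering range) = any
    if rs.any (fun p => decide (p.1 ≤ nxt) && decide (nxt ≤ p.2)) then (queue, visited)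
    else ((queue.1, nxt :: queue.2),
          visited.setIfInBounds nxt.toNat (visited.getD cur.toNat 0 + 1))
  else (queue, visited)

-- A's while loop; fuel n.toNat+2 bounds the pops (each of the ≤ n+1 cells is
-- enqueued at most once thanks to the visited guard), so fuel never runs out
def bfsLoopA (n a b : Int) (rs : List (Int × Int)) :
    Nat → List Int × List Int → Array Int → Int
  | 0, _, _ => -1
  | fuel+1, queue, visited =>
    match bfsPop queue with
    | none => -1
    | some (cur, rest) =>
      if cur = n then visited.getD cur.toNat 0 - 1
      else
        let s1 := bfsStepA n rs rest visited cur (cur + a)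
        let s2 := bfsStepA n rs s1.1 s1.2 cur (cur + b)
        bfsLoopA n a b rs fuel s2.1 s2.2

def bfs (n : Int) (a : Int) (b : Int) (forbidden_ranges : List (Int × Int)) : Int :=
  bfsLoopA n a b forbidden_ranges (n.toNat + 2) ([0], [])
    (((List.replicate (n.toNat + 1) (0:Int)).toArray).setIfInBounds 0 1)

-- ===== PORT B =====
-- difference-array update for one (s, e) range, clamped to [0, n]
def bfsDiffUpd (n : Int) (d : Array Int) (p : Int × Int) : Array Int :=
  let lo := max p.1 0
  let hi := min p.2 n
  if lo ≤ hi then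
    let d1 := d.setIfInBounds lo.toNat (d.getD lo.toNat 0 + 1)
    d1.setIfInBounds (hi.toNat + 1) (d1.getD (hi.toNat + 1) 0 - 1)
  else d

-- the running-sum loop appending `run > 0` to the boolean table
def bfsRunStep (st : Int × Array Bool) (v : Int) : Int × Array Bool :=
  (st.1 + v, st.2.push (decide (0 < st.1 + v)))

-- the body of B's `for nxt in (cur+a, cur+b)` loop: state = (order, dist)
def bfsRelax (n : Int) (forb : Array Bool) (cur : Int)
    (s : List Int × Array Int) (nxt : Int) : List Int × Array Int :=
  if 0 ≤ nxt ∧ nxt ≤ n ∧ s.2.getD nxt.toNat 0 < 0 ∧ forb.getD nxt.toNat false = false then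
    (s.1 ++ [nxt], s.2.setIfInBounds nxt.toNat (s.2.getD cur.toNat 0 + 1))
  else s

-- B's `while i < len(order)` loop, one pop per fuel unit (same bound as A's)
def bfsLoopB (n a b : Int) (forb : Array Bool) :
    Nat → Nat → List Int → Array Int → Int
  | 0, _, _, _ => -1
  | fuel+1, i, order, dist =>
    if i < order.length then
      let cur := order.getD i 0
      if cur = n then dist.getD cur.toNat 0
      else
        let st := [cur + a, cur + b].foldl (bfsRelax n forb cur) (order, dist)
        bfsLoopB n a b forb fuel (i+1) st.1 st.2
    else -1

def bfs_alt (n : Int) (a : Int) (b : Int) (forbidden_ranges : List (Int × Int)) : Int :=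
  let diff := forbidden_ranges.foldl (bfsDiffUpd n) ((List.replicate (n.toNat + 2) (0:Int)).toArray)
  let forb := (diff.foldl bfsRunStep ((0:Int), (#[] : Array Bool))).2
  bfsLoopB n a b forb (n.toNat + 2) 0 [0]
    (((List.replicate (n.toNat + 1) (-1:Int)).toArray).setIfInBounds 0 0)

-- ===== PRECONDITION & SPEC =====
-- A raises IndexError (visited[0] on an empty/short list) whenever n < 0; Pre_ keeps n ≥ 0.
def Pre_bfs (n : Int) (a : Int) (b : Int) (forbidden_ranges : List (Int × Int)) : Prop := 0 ≤ n
instance (n : Int) (a : Int) (b : Int) (forbidden_ranges : List (Int × Int)) : Decidable (Pre_bfs n a b forbidden_ranges) := by unfold Pre_bfs; infer_instance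
def pvWitness_bfs : Int × Int × Int × (List (Int × Int)) := (5, 2, 3, [(1, 1)])

def Spec_bfs (n : Int) (a : Int) (b : Int) (forbidden_ranges : List (Int × Int)) (out : Int) : Prop := out = bfs_alt n a b forbidden_ranges
instance (n : Int) (a : Int) (b : Int) (forbidden_ranges : List (Int × Int)) (out : Int) : Decidable (Spec_bfs n a b forbidden_ranges out) := by unfold Spec_bfs; infer_instance

-- ===== CLAIM (what is proved, stated in full; the proofs are below) =====
def Claim_equal_bfs : Prop := ∀ (n : Int) (a : Int) (b : Int) (forbidden_ranges : List (Int × Int)), Dom_bfs n a b forbidden_ranges → Pre_bfs n a b forbidden_ranges → Spec_bfs n a b forbidden_ranges (bfs n a b forbidden_ranges)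

-- ===== LEMMAS AND PROOFS =====

theorem arr_getD {α : Type} (a : Array α) (i : Nat) (d : α) : a.getD i d = a.toList.getD i d := by
  by_cases h : i < a.size
  · simp [Array.getD, h, List.getD, List.getElem?_eq_getElem, Array.getElem_toList]
  · simp [Array.getD, h, List.getD]

theorem sum_take_set (l : List Int) (i k : Nat) (v : Int) (hi : i < l.length) :
    ((l.set i v).take k).sum = (l.take k).sum + (if i < k then v - l.getD i 0 else 0) := by
  induction l generalizing i k with
  | nil => simp at hi
  | cons h t ih =>
    cases i with
    | zero =>
      cases k with
      | zero => simp
      | succ k => simp [List.getD]; ring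
    | succ i =>
      cases k with
      | zero => simp
      | succ k =>
        simp only [List.set, List.take, List.sum_cons, List.getD, List.getElem?_cons_succ]
        rw [show ((t.set i v).take k).sum = (t.take k).sum + (if i < k then v - t.getD i 0 else 0)
          from ih i k (by simpa using hi)]
        simp only [List.getD]
        by_cases hik : i < k <;> simp [hik] <;> omega

-- prefix sums of a list, starting from acc
def psl : Int → List Int → List Int
  | _, [] => []
  | acc, v :: t => (acc + v) :: psl (acc + v) t

theorem foldl_runStep (l : List Int) (acc : Int) (out : Array Bool) :
    ((l.foldl bfsRunStep (acc, out)).2).toList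
      = out.toList ++ (psl acc l).map (fun v => decide (0 < v)) := by
  induction l generalizing acc out with
  | nil => simp [psl]
  | cons v t ih => simp [bfsRunStep, psl, ih]

theorem psl_getD (l : List Int) (acc : Int) (k : Nat) (hk : k < l.length) :
    (psl acc l).getD k 0 = acc + (l.take (k+1)).sum := by
  induction l generalizing acc k with
  | nil => simp at hk
  | cons v t ih =>
    cases k with
    | zero => simp [psl, List.getD]
    | succ k =>
      simp only [psl, List.getD, List.getElem?_cons_succ, List.take, List.sum_cons]
      rw [← List.getD, ih (acc + v) k (by simpa using hk)]
      ring

theorem psl_length (l : List Int) (acc : Int) : (psl acc l).length = l.length := by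
  induction l generalizing acc with
  | nil => rfl
  | cons v t ih => simp [psl, ih]

theorem diffUpd_toList (n : Int) (d : Array Int) (p : Int × Int) :
    (bfsDiffUpd n d p).toList =
      (let lo := max p.1 0
       let hi := min p.2 n
       if lo ≤ hi then
         let d1 := d.toList.set lo.toNat (d.toList.getD lo.toNat 0 + 1)
         d1.set (hi.toNat + 1) (d1.getD (hi.toNat + 1) 0 - 1)
       else d.toList) := by
  unfold bfsDiffUpd
  dsimp only
  split
  · simp only [arr_getD, Array.toList_setIfInBounds]
  · rfl

theorem diffUpd_delta (n x : Int) (hx0 : 0 ≤ x) (hxn : x ≤ n)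
    (d : Array Int) (hd : d.size = n.toNat + 2) (p : Int × Int) :
    (((bfsDiffUpd n d p).toList).take (x.toNat + 1)).sum
      = ((d.toList).take (x.toNat + 1)).sum + (if p.1 ≤ x ∧ x ≤ p.2 then 1 else 0) := by
  rw [diffUpd_toList]
  have hdl : d.toList.length = n.toNat + 2 := by simpa using hd
  dsimp only
  by_cases hlh : max p.1 0 ≤ min p.2 n
  · rw [if_pos hlh]
    have hlo0 : 0 ≤ max p.1 0 := le_max_right _ _
    have hhi0 : 0 ≤ min p.2 n := le_trans hlo0 hlh
    have hlolen : (max p.1 0).toNat < d.toList.length := by rw [hdl]; omega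
    have hhilen : (min p.2 n).toNat + 1 < d.toList.length := by rw [hdl]; omega
    rw [sum_take_set _ _ _ _ (by rw [List.length_set]; exact hhilen)]
    rw [sum_take_set _ _ _ _ hlolen]
    have h1 : (max p.1 0).toNat < x.toNat + 1 ↔ p.1 ≤ x := by omega
    have h2 : (min p.2 n).toNat + 1 < x.toNat + 1 ↔ p.2 < x := by omega
    by_cases hc : p.1 ≤ x ∧ x ≤ p.2
    · rw [if_pos hc]
      rw [if_pos (h1.mpr hc.1), if_neg (by rw [h2]; omega)]
      ring
    · rw [if_neg hc]
      rcases not_and_or.mp hc with hcc | hcc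
      · rw [if_neg (by rw [h1]; omega), if_neg (by rw [h2]; omega)]
        ring
      · have hx2 : p.2 < x := by omega
        rw [if_pos (h1.mpr (by omega)), if_pos (h2.mpr hx2)]
        have hne : (min p.2 n).toNat + 1 ≠ (max p.1 0).toNat := by omega
        have : (d.toList.set (max p.1 0).toNat (d.toList.getD (max p.1 0).toNat 0 + 1)).getD
            ((min p.2 n).toNat + 1) 0 = d.toList.getD ((min p.2 n).toNat + 1) 0 := by
          simp [List.getD, List.getElem?_set_ne (Ne.symm hne)]
        rw [this]; ring
  · rw [if_neg hlh]
    have : ¬ (p.1 ≤ x ∧ x ≤ p.2) := by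
      intro hc; exact hlh (le_trans (by omega) (by omega : x ≤ min p.2 n))
    rw [if_neg this]; ring

theorem diffUpd_size (n : Int) (d : Array Int) (p : Int × Int) :
    (bfsDiffUpd n d p).size = d.size := by
  unfold bfsDiffUpd; dsimp only; split <;> simp

theorem foldl_diffUpd_size (n : Int) (rs : List (Int × Int)) (d : Array Int) :
    (rs.foldl (bfsDiffUpd n) d).size = d.size := by
  induction rs generalizing d with
  | nil => rfl
  | cons p rs ih => rw [List.foldl_cons, ih, diffUpd_size]

theorem foldl_diffUpd_sum (n x : Int) (hx0 : 0 ≤ x) (hxn : x ≤ n)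
    (rs : List (Int × Int)) (d : Array Int) (hd : d.size = n.toNat + 2) :
    (((rs.foldl (bfsDiffUpd n) d).toList).take (x.toNat + 1)).sum
      = ((d.toList).take (x.toNat + 1)).sum
        + (rs.countP (fun p => decide (p.1 ≤ x) && decide (x ≤ p.2)) : Int) := by
  induction rs generalizing d with
  | nil => simp
  | cons p rs ih =>
    simp only [List.foldl_cons, List.countP_cons]
    rw [ih _ (by rw [diffUpd_size, hd]), diffUpd_delta n x hx0 hxn d hd p]
    by_cases h : p.1 ≤ x ∧ x ≤ p.2
    · have hb : (decide (p.1 ≤ x) && decide (x ≤ p.2)) = true := by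
        simp [h.1, h.2]
      rw [if_pos h, hb]
      simp only [if_pos trivial]
      push_cast
      ring
    · rw [if_neg h]
      have : (decide (p.1 ≤ x) && decide (x ≤ p.2)) = false := by
        rcases not_and_or.mp h with h1 | h1 <;> simp [h1]
      simp [this]

-- the boolean table agrees with A's scan on every cell of [0, n]
theorem forb_table_spec (n : Int) (hn : 0 ≤ n) (rs : List (Int × Int)) (x : Int)
    (hx0 : 0 ≤ x) (hxn : x ≤ n) :
    ((((rs.foldl (bfsDiffUpd n) ((List.replicate (n.toNat + 2) (0:Int)).toArray)).foldl
        bfsRunStep ((0:Int), (#[] : Array Bool))).2.getD x.toNat false = false)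
      ↔ (rs.any (fun p => decide (p.1 ≤ x) && decide (x ≤ p.2)) = false)) := by
  set d := rs.foldl (bfsDiffUpd n) ((List.replicate (n.toNat + 2) (0:Int)).toArray) with hdd
  have hlen : d.toList.length = n.toNat + 2 := by
    rw [hdd]
    simpa using foldl_diffUpd_size n rs ((List.replicate (n.toNat + 2) (0:Int)).toArray)
  have hxlen : x.toNat < (psl 0 d.toList).length := by rw [psl_length, hlen]; omega
  rw [arr_getD, show d.foldl bfsRunStep ((0:Int), (#[] : Array Bool))
      = d.toList.foldl bfsRunStep ((0:Int), (#[] : Array Bool)) from by simp,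
    foldl_runStep]
  simp only [Array.toList_empty, List.nil_append]
  have hmap : ((psl 0 d.toList).map (fun v => decide (0 < v))).getD x.toNat false
      = decide (0 < (psl 0 d.toList).getD x.toNat 0) := by
    simp [List.getD, List.getElem?_map, List.getElem?_eq_getElem hxlen]
  have hxlen2 : x.toNat < d.toList.length := by rw [hlen]; omega
  rw [hmap, psl_getD d.toList 0 x.toNat hxlen2]
  rw [hdd, foldl_diffUpd_sum n x hx0 hxn rs _ (by simp)]
  have hz : (((List.replicate (n.toNat + 2) (0:Int)).toArray.toList).take (x.toNat + 1)).sum = 0 := by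
    simp [List.take_replicate]
  rw [hz]
  simp only [zero_add]
  constructor
  · intro h
    rw [List.any_eq_false]
    intro p hp
    by_contra hb
    have hcnt : 0 < rs.countP (fun p => decide (p.1 ≤ x) && decide (x ≤ p.2)) :=
      List.countP_pos_iff.mpr ⟨p, hp, by simpa using hb⟩
    simp only [decide_eq_false_iff_not, not_lt] at h
    have : (0:Int) < (rs.countP (fun p => decide (p.1 ≤ x) && decide (x ≤ p.2)) : Int) := by
      exact_mod_cast hcnt
    omega
  · intro h
    have hcnt : rs.countP (fun p => decide (p.1 ≤ x) && decide (x ≤ p.2)) = 0 := by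
      rw [List.countP_eq_zero]
      intro p hp
      have := List.any_eq_false.mp h p hp
      simpa using this
    simp [hcnt]

-- the step relation: the two inner-loop bodies preserve the queue/dist coupling
theorem relax_eq (n : Int) (rs : List (Int × Int)) (forb : Array Bool)
    (hforb : ∀ x : Int, 0 ≤ x → x ≤ n →
      (forb.getD x.toNat false = false ↔ rs.any (fun p => decide (p.1 ≤ x) && decide (x ≤ p.2)) = false))
    (front back : List Int) (visited : Array Int) (order : List Int) (i : Nat)
    (dist : Array Int)
    (hq : order.drop i = front ++ back.reverse)
    (hmap : dist.toList = visited.toList.map (fun v => v - 1))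
    (hpos : ∀ v ∈ visited.toList, 0 ≤ v)
    (hsize : visited.toList.length = n.toNat + 1)
    (hile : i ≤ order.length)
    (cur nxt : Int) (hcur : 0 ≤ cur ∧ cur ≤ n) :
    (let sA := bfsStepA n rs (front, back) visited cur nxt
     let sB := bfsRelax n forb cur (order, dist) nxt
     sB.1.drop i = sA.1.1 ++ sA.1.2.reverse
       ∧ sB.2.toList = sA.2.toList.map (fun v => v - 1)
       ∧ (∀ v ∈ sA.2.toList, 0 ≤ v)
       ∧ sA.2.toList.length = n.toNat + 1
       ∧ order.length ≤ sB.1.length) := by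
  have hdlen : dist.toList.length = n.toNat + 1 := by rw [hmap]; simpa using hsize
  unfold bfsStepA bfsRelax
  dsimp only
  by_cases hrange : 0 ≤ nxt ∧ nxt ≤ n
  · obtain ⟨h0, h1⟩ := hrange
    have hnlt : nxt.toNat < visited.toList.length := by rw [hsize]; omega
    have hclt : cur.toNat < visited.toList.length := by rw [hsize]; omega
    have hvget : dist.getD nxt.toNat 0 = visited.toList.getD nxt.toNat 0 - 1 := by
      rw [arr_getD, hmap]
      simp [List.getD, List.getElem?_map, List.getElem?_eq_getElem hnlt]
    have hvnn : 0 ≤ visited.toList.getD nxt.toNat 0 := by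
      exact hpos (visited.toList.getD nxt.toNat 0) (by
        simp [List.getD, List.getElem?_eq_getElem hnlt])
    have hvis_iff : visited.getD nxt.toNat 0 = 0 ↔ dist.getD nxt.toNat 0 < 0 := by
      rw [arr_getD (visited), hvget]
      omega
    by_cases hv : visited.getD nxt.toNat 0 = 0
    · by_cases hf : rs.any (fun p => decide (p.1 ≤ nxt) && decide (nxt ≤ p.2)) = true
      · -- forbidden: both skip
        have hfb : ¬ forb.getD nxt.toNat false = false := by
          intro hc
          rw [(hforb nxt h0 h1).mp hc] at hf
          exact Bool.false_ne_true hf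
        rw [if_pos (show 0 ≤ nxt ∧ nxt ≤ n ∧ visited.getD nxt.toNat 0 = 0 from ⟨h0, h1, hv⟩),
            if_pos hf,
            if_neg (show ¬(0 ≤ nxt ∧ nxt ≤ n ∧ dist.getD nxt.toNat 0 < 0
              ∧ forb.getD nxt.toNat false = false) from fun hc => hfb hc.2.2.2)]
        exact ⟨hq, hmap, hpos, hsize, le_refl _⟩
      · -- allowed: both append and mark
        have hfb : forb.getD nxt.toNat false = false :=
          (hforb nxt h0 h1).mpr (by simpa using hf)
        rw [if_pos (show 0 ≤ nxt ∧ nxt ≤ n ∧ visited.getD nxt.toNat 0 = 0 from ⟨h0, h1, hv⟩),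
            if_neg hf,
            if_pos (show 0 ≤ nxt ∧ nxt ≤ n ∧ dist.getD nxt.toNat 0 < 0
              ∧ forb.getD nxt.toNat false = false from ⟨h0, h1, hvis_iff.mp hv, hfb⟩)]
        refine ⟨?_, ?_, ?_, ?_, by simp⟩
        · rw [List.drop_append_of_le_length hile, hq]
          simp
        · have hcget : dist.getD cur.toNat 0 = visited.getD cur.toNat 0 - 1 := by
            rw [arr_getD dist, arr_getD visited, hmap]
            simp [List.getD, List.getElem?_map, List.getElem?_eq_getElem hclt]
          simp only [Array.toList_setIfInBounds, hmap, hcget]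
          rw [List.map_set]
          congr 1
          ring
        · intro v hv'
          simp only [Array.toList_setIfInBounds] at hv'
          rcases List.mem_or_eq_of_mem_set hv' with h | h
          · exact hpos v h
          · have := hpos (visited.toList.getD cur.toNat 0) (by
              simp [List.getD, List.getElem?_eq_getElem hclt])
            have hcv : visited.getD cur.toNat 0 = visited.toList.getD cur.toNat 0 :=
              arr_getD _ _ _
            omega
        · simp [hsize]
    · have hnd : ¬ dist.getD nxt.toNat 0 < 0 := fun hc => hv (hvis_iff.mpr hc)
      rw [if_neg (show ¬(0 ≤ nxt ∧ nxt ≤ n ∧ visited.getD nxt.toNat 0 = 0)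
            from fun hc => hv hc.2.2),
          if_neg (show ¬(0 ≤ nxt ∧ nxt ≤ n ∧ dist.getD nxt.toNat 0 < 0
            ∧ forb.getD nxt.toNat false = false) from fun hc => hnd hc.2.2.1)]
      exact ⟨hq, hmap, hpos, hsize, le_refl _⟩
  · rw [if_neg (show ¬(0 ≤ nxt ∧ nxt ≤ n ∧ visited.getD nxt.toNat 0 = 0)
          from fun hc => hrange ⟨hc.1, hc.2.1⟩),
        if_neg (show ¬(0 ≤ nxt ∧ nxt ≤ n ∧ dist.getD nxt.toNat 0 < 0
          ∧ forb.getD nxt.toNat false = false) from fun hc => hrange ⟨hc.1, hc.2.1⟩)]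
    exact ⟨hq, hmap, hpos, hsize, le_refl _⟩

theorem loop_eq (n a b : Int) (rs : List (Int × Int)) (forb : Array Bool)
    (hforb : ∀ x : Int, 0 ≤ x → x ≤ n →
      (forb.getD x.toNat false = false ↔ rs.any (fun p => decide (p.1 ≤ x) && decide (x ≤ p.2)) = false))
    (fuel : Nat) :
    ∀ (front back : List Int) (visited : Array Int) (i : Nat) (order : List Int)
      (dist : Array Int),
      order.drop i = front ++ back.reverse →
      dist.toList = visited.toList.map (fun v => v - 1) →
      (∀ v ∈ visited.toList, 0 ≤ v) →
      visited.toList.length = n.toNat + 1 →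
      (∀ x ∈ front ++ back.reverse, 0 ≤ x ∧ x ≤ n) →
      bfsLoopA n a b rs fuel (front, back) visited = bfsLoopB n a b forb fuel i order dist := by
  induction fuel with
  | zero => intro front back visited i order dist _ _ _ _ _; rfl
  | succ fuel ih =>
    intro front back visited i order dist hq hmap hpos hsize hmem
    have hget_of_drop : ∀ (cur : Int) (rest : List Int), order.drop i = cur :: rest →
        i < order.length ∧ order.getD i 0 = cur ∧ order.drop (i+1) = rest := by
      intro cur rest hdrop
      have hlt : i < order.length := by
        by_contra hle
        rw [List.drop_eq_nil_of_le (by omega)] at hdrop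
        simp at hdrop
      have hge : order[i]? = some cur := by
        have h0 : (order.drop i)[0]? = some cur := by rw [hdrop]; rfl
        simpa using h0
      refine ⟨hlt, ?_, ?_⟩
      · simp [List.getD, hge]
      · have hdd1 : order.drop (i+1) = (order.drop i).drop 1 := by
          rw [List.drop_drop]
        rw [hdd1, hdrop, List.drop_one, List.tail_cons]
    -- analyse the pop
    unfold bfsLoopA bfsLoopB
    cases hfront : front with
    | cons cur f' =>
      have hdrop : order.drop i = cur :: (f' ++ back.reverse) := by
        rw [hq, hfront]; rfl
      obtain ⟨hlt, hgd, hdrop1⟩ := hget_of_drop cur _ hdrop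
      have hcur : 0 ≤ cur ∧ cur ≤ n := hmem cur (by rw [hfront]; simp)
      simp only [bfsPop, hfront, if_pos hlt, hgd]
      by_cases hcn : cur = n
      · rw [if_pos hcn, if_pos hcn]
        have hclt : cur.toNat < visited.toList.length := by
          rw [hsize]; omega
        rw [arr_getD dist, arr_getD visited, hmap]
        simp [List.getD, List.getElem?_map, List.getElem?_eq_getElem hclt]
      · rw [if_neg hcn, if_neg hcn]
        -- two relax steps in lockstep
        have hmem' : ∀ x ∈ f' ++ back.reverse, 0 ≤ x ∧ x ≤ n := by
          intro x hx; exact hmem x (by rw [hfront]; simp at hx ⊢; tauto)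
        obtain ⟨hq1, hmap1, hpos1, hsize1, hlen1⟩ :=
          relax_eq n rs forb hforb f' back visited order (i+1) dist hdrop1 hmap hpos hsize
            (by omega) cur (cur + a) hcur
        obtain ⟨hq2, hmap2, hpos2, hsize2, hlen2⟩ :=
          relax_eq n rs forb hforb _ _ _ _ (i+1) _ hq1 hmap1 hpos1 hsize1
            (by omega) cur (cur + b) hcur
        simp only [List.foldl_cons, List.foldl_nil]
        apply ih _ _ _ _ _ _ hq2 hmap2 hpos2 hsize2
        -- membership for the new queue
        intro x hx
        -- every element of the new queue came from the old one or was range-checked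
        have step_mem : ∀ (q : List Int × List Int) (v : Array Int) (c m : Int),
            (∀ y ∈ q.1 ++ q.2.reverse, 0 ≤ y ∧ y ≤ n) →
            ∀ y ∈ (bfsStepA n rs q v c m).1.1 ++ (bfsStepA n rs q v c m).1.2.reverse,
              0 ≤ y ∧ y ≤ n := by
          intro q v c m hold y hy
          unfold bfsStepA at hy
          by_cases hc1 : 0 ≤ m ∧ m ≤ n ∧ v.getD m.toNat 0 = 0
          · rw [if_pos hc1] at hy
            by_cases hc2 : rs.any (fun p => decide (p.1 ≤ m) && decide (m ≤ p.2)) = true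
            · rw [if_pos hc2] at hy; exact hold y hy
            · rw [if_neg hc2] at hy
              simp only [List.reverse_cons] at hy
              rcases List.mem_append.mp hy with h | h
              · exact hold y (List.mem_append.mpr (Or.inl h))
              · rcases List.mem_append.mp h with h' | h'
                · exact hold y (List.mem_append.mpr (Or.inr h'))
                · simp at h'
                  subst h'
                  exact ⟨hc1.1, hc1.2.1⟩
          · rw [if_neg hc1] at hy; exact hold y hy
        exact step_mem _ _ _ _ (step_mem _ _ _ _ hmem') x hx
    | nil =>
      cases hback : back.reverse with
      | nil =>
        have : order.drop i = [] := by rw [hq, hfront, hback]; rfl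
        have hge : ¬ i < order.length := by
          by_contra hlt
          have := List.drop_eq_nil_iff.mp this
          omega
        simp only [bfsPop, hfront, hback, if_neg hge]
      | cons cur rest =>
        have hdrop : order.drop i = cur :: rest := by rw [hq, hfront, hback]; rfl
        obtain ⟨hlt, hgd, hdrop1⟩ := hget_of_drop cur _ hdrop
        have hcur : 0 ≤ cur ∧ cur ≤ n := hmem cur (by rw [hfront, hback]; simp)
        simp only [bfsPop, hfront, hback, if_pos hlt, hgd]
        by_cases hcn : cur = n
        · rw [if_pos hcn, if_pos hcn]
          have hclt : cur.toNat < visited.toList.length := by rw [hsize]; omega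
          rw [arr_getD dist, arr_getD visited, hmap]
          simp [List.getD, List.getElem?_map, List.getElem?_eq_getElem hclt]
        · rw [if_neg hcn, if_neg hcn]
          have hrest : order.drop (i+1) = rest ++ ([] : List Int).reverse := by
            rw [hdrop1]; simp
          have hmem' : ∀ x ∈ rest ++ ([] : List Int).reverse, 0 ≤ x ∧ x ≤ n := by
            intro x hx
            simp only [List.reverse_nil, List.append_nil] at hx
            exact hmem x (by rw [hfront, hback]; simp [hx])
          obtain ⟨hq1, hmap1, hpos1, hsize1, hlen1⟩ :=
            relax_eq n rs forb hforb rest [] visited order (i+1) dist hrest hmap hpos hsize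
              (by omega) cur (cur + a) hcur
          obtain ⟨hq2, hmap2, hpos2, hsize2, hlen2⟩ :=
            relax_eq n rs forb hforb _ _ _ _ (i+1) _ hq1 hmap1 hpos1 hsize1
              (by omega) cur (cur + b) hcur
          simp only [List.foldl_cons, List.foldl_nil]
          apply ih _ _ _ _ _ _ hq2 hmap2 hpos2 hsize2
          intro x hx
          have step_mem : ∀ (q : List Int × List Int) (v : Array Int) (c m : Int),
              (∀ y ∈ q.1 ++ q.2.reverse, 0 ≤ y ∧ y ≤ n) →
              ∀ y ∈ (bfsStepA n rs q v c m).1.1 ++ (bfsStepA n rs q v c m).1.2.reverse,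
                0 ≤ y ∧ y ≤ n := by
            intro q v c m hold y hy
            unfold bfsStepA at hy
            by_cases hc1 : 0 ≤ m ∧ m ≤ n ∧ v.getD m.toNat 0 = 0
            · rw [if_pos hc1] at hy
              by_cases hc2 : rs.any (fun p => decide (p.1 ≤ m) && decide (m ≤ p.2)) = true
              · rw [if_pos hc2] at hy; exact hold y hy
              · rw [if_neg hc2] at hy
                simp only [List.reverse_cons] at hy
                rcases List.mem_append.mp hy with h | h
                · exact hold y (List.mem_append.mpr (Or.inl h))
                · rcases List.mem_append.mp h with h' | h'
                  · exact hold y (List.mem_append.mpr (Or.inr h'))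
                  · simp at h'
                    subst h'
                    exact ⟨hc1.1, hc1.2.1⟩
            · rw [if_neg hc1] at hy; exact hold y hy
          exact step_mem _ _ _ _ (step_mem _ _ _ _ hmem') x hx

-- ===== VERDICT (by name: the statement is the Claim_ definition above) =====
theorem bfs_spec : Claim_equal_bfs := by
  intro n a b rs _ hpre
  unfold Spec_bfs bfs bfs_alt
  apply loop_eq n a b rs _ (fun x hx0 hxn => forb_table_spec n hpre rs x hx0 hxn)
  · rfl
  · simp [List.map_set]
  · intro v hv
    simp only [Array.toList_setIfInBounds, List.toList_toArray] at hv
    rcases List.mem_or_eq_of_mem_set hv with h | h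
    · have := List.eq_of_mem_replicate h; omega
    · omega
  · simp
  · intro x hx
    simp at hx
    subst hx
    exact ⟨le_refl 0, hpre⟩
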